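-- pv_equiv track=rewrite | github.com/RacsoTims/advent-of-code | 2017/day6.py | distribute_blocks
-- ===== SOURCE A (Python) =====
-- def find_bank_with_most_blocks(area) -> tuple:
-- 	return (max(area), area.index(max(area)))
--
-- def distribute_blocks(area):
-- 	blocks, bank = find_bank_with_most_blocks(area)
-- 	current_bank = (bank+1) % len(area)
-- 	for i in range(blocks, 0, -1):
-- 		area[current_bank] += 1
-- 		area[bank] -= 1
-- 		current_bank = (current_bank+1) % len(area)
-- 	return area
-- ===== SOURCE B (Python) =====
-- def distribute_blocks(area):
--     n = len(area)
--     blocks = max(area)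
--     if blocks <= 0:
--         return area
--     bank = area.index(blocks)
--     q, r = divmod(blocks, n)
--     area[:] = [v + q + (1 if (j - bank - 1) % n < r else 0)
--                  - (blocks if j == bank else 0)
--                for j, v in enumerate(area)]
--     return area
-- ===== Notes on version B (the rewrite author's own statement) =====
-- stated objective: alternative
-- what changed: Replaces the one-block-at-a-time redistribution loop (one iteration per block) by a closed form: each bank gains blocks//n plus 1 for the first blocks%n banks after the source, computed in a single pass over the list.
import Mathlib
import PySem

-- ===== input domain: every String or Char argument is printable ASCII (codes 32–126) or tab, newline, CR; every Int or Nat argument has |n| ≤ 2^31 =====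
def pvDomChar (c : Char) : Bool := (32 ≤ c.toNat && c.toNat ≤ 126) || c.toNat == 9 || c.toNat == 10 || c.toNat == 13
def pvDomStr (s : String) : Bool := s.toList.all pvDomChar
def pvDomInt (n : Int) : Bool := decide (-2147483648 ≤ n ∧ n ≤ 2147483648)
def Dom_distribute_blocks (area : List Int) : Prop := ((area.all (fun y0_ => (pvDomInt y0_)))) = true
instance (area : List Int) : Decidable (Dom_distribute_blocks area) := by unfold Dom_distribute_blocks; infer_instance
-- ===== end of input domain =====

-- B replaces A's one-block-at-a-time redistribution loop by a closed form (base share blocks//n plus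
-- a remainder indicator per bank), computed in one pass over the list; both Pythons mutate `area` in
-- place and return it — the equivalence proved here is about the returned value.

-- ===== PORT A =====
-- Python: return (max(area), area.index(max(area))); none = max([]) raises ValueError (excluded by Pre_).
-- `index?` is some here because max? returns a member, so the `.getD 0` default is never used.
def find_bank_with_most_blocks (area : List Int) : Option (Int × Nat) :=
  match PySem.List.max? area (fun x => x) with
  | none => none
  | some m => some (m, (PySem.List.index? area m).getD 0)

-- one iteration of A's for-loop body; indices are always in range (current_bank = … % len, bank an index),
-- so pySetD/pyGetD are exact here
def aStep (n : Int) (bank : Nat) (s : List Int × Int) : List Int × Int :=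
  let a := PySem.List.pySetD s.1 s.2 (PySem.List.pyGetD s.1 s.2 0 + 1)
  let a2 := PySem.List.pySetD a (bank : Int) (PySem.List.pyGetD a (bank : Int) 0 - 1)
  (a2, PySem.Int.mod (s.2 + 1) n)

def distribute_blocks (area : List Int) : List Int :=
  match find_bank_with_most_blocks area with
  | none => area  -- unreachable under Pre_ (Python raises ValueError on [])
  | some (blocks, bank) =>
    let n : Int := area.length
    let final := (PySem.List.pyRange blocks 0 (-1)).foldl
      (fun s _ => aStep n bank s)
      (area, PySem.Int.mod ((bank : Int) + 1) n)
    final.1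

-- ===== PORT B =====
def distribute_blocks_alt (area : List Int) : List Int :=
  match PySem.List.max? area (fun x => x) with
  | none => area  -- unreachable under Pre_ (Python raises ValueError on [])
  | some blocks =>
    if blocks ≤ 0 then area
    else
      let n : Int := area.length
      let bank : Nat := (PySem.List.index? area blocks).getD 0
      let q := PySem.Int.floordiv blocks n
      let r := PySem.Int.mod blocks n
      (PySem.List.enumerate area 0).map (fun p =>
        p.2 + q + (if PySem.Int.mod (p.1 - (bank : Int) - 1) n < r then 1 else 0)
          - (if p.1 = (bank : Int) then blocks else 0))

-- ===== PRECONDITION & SPEC =====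
-- Pre_ excludes only the empty list, on which Python's max(area) raises ValueError (in both A and B).
def Pre_distribute_blocks (area : List Int) : Prop := area ≠ []
instance (area : List Int) : Decidable (Pre_distribute_blocks area) := by unfold Pre_distribute_blocks; infer_instance

def pvWitness_distribute_blocks : List Int := [0, 2, 7, 0]

def Spec_distribute_blocks (area : List Int) (out : List Int) : Prop := out = distribute_blocks_alt area
instance (area : List Int) (out : List Int) : Decidable (Spec_distribute_blocks area out) := by unfold Spec_distribute_blocks; infer_instance

-- ===== CLAIM (what is proved, stated in full; the proofs are below) =====
def Claim_equal_distribute_blocks : Prop := ∀ (area : List Int), Dom_distribute_blocks area → Pre_distribute_blocks area → Spec_distribute_blocks area (distribute_blocks area)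

-- ===== LEMMAS AND PROOFS =====

-- folding a function that ignores the list elements is iteration
lemma foldl_ignore {α β : Type} (g : β → β) : ∀ (l : List α) (init : β),
    l.foldl (fun s _ => g s) init = g^[l.length] init := by
  intro l
  induction l with
  | nil => intro init; rfl
  | cons x t ih =>
    intro init
    simp [List.foldl_cons, ih, Function.iterate_succ_apply]

-- setting an in-range index of a mapped range re-maps with a pointwise update
lemma set_map_range {n c : Nat} (_hc : c < n) (f : Nat → Int) (v : Int) :
    ((List.range n).map f).set c v = (List.range n).map (fun j => if j = c then v else f j) := by
  apply List.ext_getElem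
  · simp
  · intro i h1 h2
    simp only [List.getElem_set, List.getElem_map, List.getElem_range]
    by_cases h : i = c
    · simp [h]
    · simp [h, Ne.symm h]

lemma map_getD_range (n : Nat) (area : List Int) (hlen : area.length = n) :
    (List.range n).map (fun j => area.getD j 0) = area := by
  apply List.ext_getElem
  · simp [hlen]
  · intro i h1 h2
    simp only [List.getElem_map, List.getElem_range]
    rw [List.getD_eq_getElem area 0 (by omega)]

-- count of m < M with m % n = j
lemma countP_range_mod (n j : Nat) (hn : 0 < n) (hj : j < n) : ∀ (M : Nat),
    (List.range M).countP (fun m => m % n = j) =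
      M / n + (if j < M % n then 1 else 0) := by
  intro M
  induction M with
  | zero => simp
  | succ M ih =>
    rw [List.range_succ, List.countP_append, ih]
    have hm : M % n < n := Nat.mod_lt _ hn
    have hdm : n * (M / n) + M % n = M := Nat.div_add_mod M n
    simp only [List.countP_cons, List.countP_nil, decide_eq_true_eq]
    by_cases h : M % n + 1 = n
    · -- n divides M+1
      have h1 : M + 1 = n * (M / n + 1) := by
        have : n * (M / n + 1) = n * (M / n) + n := by ring
        omega
      have h2 : (M + 1) / n = M / n + 1 := by
        rw [h1, Nat.mul_div_cancel_left _ hn]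
      have h3 : (M + 1) % n = 0 := by
        rw [h1, Nat.mul_mod_right]
      rw [h2, h3]
      split_ifs <;> omega
    · have h1 : M + 1 = (M % n + 1) + n * (M / n) := by omega
      have h2 : (M + 1) / n = M / n := by
        rw [h1, Nat.add_mul_div_left _ _ hn, Nat.div_eq_of_lt (by omega)]
        omega
      have h3 : (M + 1) % n = M % n + 1 := by
        rw [h1, Nat.add_mul_mod_self_left, Nat.mod_eq_of_lt (by omega)]
      rw [h2, h3]
      split_ifs <;> omega

-- shifting the counted window
lemma countP_range_shift (n j s : Nat) (k : Nat) :
    (List.range (s + k)).countP (fun m => m % n = j) =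
      (List.range s).countP (fun m => m % n = j) +
      (List.range k).countP (fun t => (s + t) % n = j) := by
  rw [List.range_add, List.countP_append, List.countP_map]
  rfl

-- closed-form count of hits of a cyclic walk of k steps starting at s
lemma countP_cyclic (n s j k : Nat) (hn : 0 < n) (hs : s < n) (hj : j < n) :
    (List.range k).countP (fun t => (s + t) % n = j) =
      k / n + (if (if s ≤ j then j - s else j + n - s) < k % n then 1 else 0) := by
  have hG := countP_range_mod n j hn hj
  have hshift := countP_range_shift n j s k
  rw [hG (s + k), hG s] at hshift
  have hs0 : s / n = 0 := Nat.div_eq_of_lt hs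
  have hsm : s % n = s := Nat.mod_eq_of_lt hs
  have hadd : (s + k) / n = s / n + k / n + if n ≤ s % n + k % n then 1 else 0 :=
    Nat.add_div hn
  have hmod : (s + k) % n = (s + k % n) % n := by
    conv_lhs => rw [Nat.add_mod]
    conv_rhs => rw [Nat.add_mod, Nat.mod_mod_of_dvd k (dvd_refl n)]
  have hkm : k % n < n := Nat.mod_lt _ hn
  have hmod2 : (s + k % n) % n = if s + k % n < n then s + k % n else s + k % n - n := by
    split_ifs with h
    · exact Nat.mod_eq_of_lt h
    · rw [Nat.mod_eq_sub_mod (by omega), Nat.mod_eq_of_lt (by omega)]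
  rw [hs0, hsm, hadd, hs0, hsm, hmod, hmod2] at hshift
  split_ifs at hshift <;> split_ifs <;> omega

-- characterization of A's loop: k iterations starting at cursor s
lemma loopA (n : Nat) (hn : 0 < n) (bank : Nat) (hb : bank < n)
    (area : List Int) :
    ∀ (k s : Nat), s < n →
    (aStep (n : Int) bank)^[k] ((List.range n).map (fun j => area.getD j 0), ((s : Nat) : Int)) =
      ((List.range n).map (fun j =>
          area.getD j 0 + ((List.range k).countP (fun t => (s + t) % n = j) : Int)
            - (if j = bank then (k : Int) else 0)),
       (((s + k) % n : Nat) : Int)) := by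
  intro k
  induction k with
  | zero =>
    intro s hs
    rw [Function.iterate_zero_apply]
    refine Prod.ext ?_ ?_
    · simp
    · simp [Nat.mod_eq_of_lt hs]
  | succ k ih =>
    intro s hs
    rw [Function.iterate_succ_apply', ih s hs]
    have hc : (s + k) % n < n := Nat.mod_lt _ hn
    have hget : ∀ (f : Nat → Int) (m : Nat), m < n →
        PySem.List.pyGetD ((List.range n).map f) ((m : Nat) : Int) 0 = f m := by
      intro f m hm
      rw [PySem.List.pyGetD_natCast, List.getD_eq_getElem _ 0 (by simp [hm])]
      simp
    unfold aStep
    simp only [PySem.List.pySetD_natCast]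
    rw [hget _ ((s + k) % n) hc, set_map_range hc]
    rw [hget _ bank hb, set_map_range hb]
    refine Prod.ext ?_ ?_
    · -- list component
      simp only
      apply List.map_congr_left
      intro j hj
      rw [List.mem_range] at hj
      have hcount : (List.range (k + 1)).countP (fun t => (s + t) % n = j) =
          (List.range k).countP (fun t => (s + t) % n = j) +
            (if (s + k) % n = j then 1 else 0) := by
        rw [List.range_succ, List.countP_append]
        simp only [List.countP_cons, List.countP_nil, decide_eq_true_eq]
        omega
      rw [hcount]
      by_cases h1 : j = bank
      · subst h1
        by_cases h2 : j = (s + k) % n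
        · rw [← h2]
          split_ifs <;> push_cast <;> omega
        · have h2' : ¬((s + k) % n = j) := fun h => h2 h.symm
          split_ifs <;> push_cast <;> omega
      · by_cases h2 : j = (s + k) % n
        · rw [← h2]
          split_ifs <;> push_cast <;> omega
        · split_ifs <;> push_cast <;> omega
    · -- cursor component
      simp only
      have hm : PySem.Int.mod ((((s + k) % n : Nat) : Int) + 1) (n : Int) =
          ((((s + k) % n + 1) % n : Nat) : Int) := by
        push_cast
        exact_mod_cast PySem.Int.mod_natCast ((s + k) % n + 1) n
      rw [hm, Nat.mod_add_mod, show s + k + 1 = s + (k + 1) from by omega]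

-- Python's (j - bank - 1) % n as a Nat, for j, bank < n
lemma int_mod_shift (n bank j : Nat) (hn : 0 < n) (hb : bank < n) (hj : j < n) :
    PySem.Int.mod ((j : Int) - (bank : Int) - 1) (n : Int) =
      (((if (bank + 1) % n ≤ j then j - (bank + 1) % n else j + n - (bank + 1) % n) : Nat) : Int) := by
  have hnpos : (0 : Int) < (n : Int) := by exact_mod_cast hn
  rw [PySem.Int.mod_eq_emod_of_pos hnpos]
  have hs : (bank + 1) % n < n := Nat.mod_lt _ hn
  set d : Nat := if (bank + 1) % n ≤ j then j - (bank + 1) % n else j + n - (bank + 1) % n with hddef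
  have hd : d < n := by rw [hddef]; split_ifs <;> omega
  have hex : ∃ t : Int, (j : Int) - (bank : Int) - 1 = (d : Int) + (n : Int) * t := by
    have hdval : (d : Int) = if (bank + 1) % n ≤ j then (j : Int) - ((bank + 1) % n : Nat)
        else (j : Int) + n - ((bank + 1) % n : Nat) := by
      rw [hddef]
      split_ifs with h
      · push_cast [Nat.cast_sub h]; ring
      · push_cast [Nat.cast_sub (by omega : (bank + 1) % n ≤ j + n)]; ring
    by_cases h : bank + 1 = n
    · have hs0 : (bank + 1) % n = 0 := by simp [h]
      refine ⟨-1, ?_⟩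
      rw [hdval, hs0]
      simp only [Nat.cast_zero, sub_zero]
      split_ifs with h2
      · omega
      · omega
    · have hs1 : (bank + 1) % n = bank + 1 := Nat.mod_eq_of_lt (by omega)
      rw [hdval, hs1]
      by_cases h2 : bank + 1 ≤ j
      · refine ⟨0, ?_⟩
        rw [if_pos h2]
        push_cast; ring
      · refine ⟨-1, ?_⟩
        rw [if_neg h2]
        push_cast; ring
  obtain ⟨t, ht⟩ := hex
  rw [ht, Int.add_mul_emod_self_left,
    Int.emod_eq_of_lt (by positivity) (by exact_mod_cast hd)]

-- B's comprehension over enumerate, elementwise over range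
lemma altB (area : List Int) (n : Nat) (hlen : area.length = n) (blocks : Int) (bank : Nat) (q r : Int) :
    (PySem.List.enumerate area 0).map (fun p =>
        p.2 + q + (if PySem.Int.mod (p.1 - (bank : Int) - 1) ((n : Nat) : Int) < r then 1 else 0)
          - (if p.1 = (bank : Int) then blocks else 0)) =
    (List.range n).map (fun j =>
        area.getD j 0 + q + (if PySem.Int.mod ((j : Int) - (bank : Int) - 1) ((n : Nat) : Int) < r then 1 else 0)
          - (if (j : Int) = (bank : Int) then blocks else 0)) := by
  subst hlen
  apply List.ext_getElem
  · simp [PySem.List.length_enumerate]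
  · intro i h1 h2
    simp only [List.length_map, PySem.List.length_enumerate] at h1
    simp only [List.getElem_map, List.getElem_range,
      PySem.List.getElem_enumerate area 0 i (by simp [PySem.List.length_enumerate]; omega)]
    rw [List.getD_eq_getElem area 0 (by omega)]
    norm_num

-- ===== VERDICT (by name: the statement is the Claim_ definition above) =====
theorem distribute_blocks_spec : Claim_equal_distribute_blocks := by
  intro area _hdom hpre
  unfold Spec_distribute_blocks distribute_blocks distribute_blocks_alt find_bank_with_most_blocks
  cases hmax : PySem.List.max? area (fun x => x) with
  | none =>
    exact absurd (PySem.List.max?_eq_none_iff area (fun x => x) |>.mp hmax) hpre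
  | some blocks =>
    have hmem : blocks ∈ area := PySem.List.max?_mem hmax
    obtain ⟨bank, hbank⟩ : ∃ b, PySem.List.index? area blocks = some b :=
      Option.isSome_iff_exists.mp ((PySem.List.index?_isSome_iff area blocks).mpr hmem)
    obtain ⟨hblt, _hval, _⟩ := PySem.List.getElem_of_index?_eq_some hbank
    have hn : 0 < area.length := List.length_pos_iff.mpr hpre
    simp only [hbank, Option.getD_some]
    by_cases hpos : blocks ≤ 0
    · -- no blocks to move: the loop is empty and B returns area unchanged
      rw [PySem.List.pyRange_neg_one_eq_nil hpos, if_pos hpos]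
      rfl
    · rw [if_neg hpos]
      rw [not_le] at hpos
      have hblocks : blocks = (blocks.toNat : Int) := by omega
      have hstart : PySem.Int.mod ((bank : Int) + 1) ((area.length : Nat) : Int) =
          (((bank + 1) % area.length : Nat) : Int) := by
        push_cast
        exact_mod_cast PySem.Int.mod_natCast (bank + 1) area.length
      have hs : (bank + 1) % area.length < area.length := Nat.mod_lt _ hn
      rw [foldl_ignore, PySem.List.length_pyRange_neg_one]
      have hlenB : (blocks - 0).toNat = blocks.toNat := by omega
      rw [hlenB, hstart]
      obtain ⟨n, hnl⟩ : ∃ m, area.length = m := ⟨_, rfl⟩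
      rw [hnl] at hblt hn hstart hs ⊢
      conv_lhs => rw [← map_getD_range n area hnl]
      rw [loopA n hn bank hblt area blocks.toNat ((bank + 1) % n) hs]
      rw [altB area n hnl blocks bank _ _]
      simp only
      apply List.map_congr_left
      intro j hj
      rw [List.mem_range] at hj
      rw [int_mod_shift n bank j hn hblt hj]
      have hq : PySem.Int.floordiv blocks ((n : Nat) : Int) =
          ((blocks.toNat / n : Nat) : Int) := by
        rw [hblocks]; exact_mod_cast PySem.Int.floordiv_natCast blocks.toNat n
      have hr : PySem.Int.mod blocks ((n : Nat) : Int) =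
          ((blocks.toNat % n : Nat) : Int) := by
        rw [hblocks]; exact_mod_cast PySem.Int.mod_natCast blocks.toNat n
      rw [hq, hr, countP_cyclic n ((bank + 1) % n) j blocks.toNat hn hs hj]
      have hjb : ((j : Int) = (bank : Int)) ↔ (j = bank) := by exact_mod_cast Iff.rfl
      rw [hblocks]
      by_cases h1 : j = bank <;> simp only [h1, hjb, if_true, if_false] <;>
        split_ifs <;> push_cast <;> omega
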